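-- pv_equiv track=rewrite | github.com/NeLy-EPFL/ballpushing_utils | tests/unit/test_ball_assignment_logic.py | simulate_ball_assignment
-- ===== SOURCE A (Python) =====
-- def simulate_ball_assignment(track_names: list[str]):
--     """Reproduce the ball-role assignment that :class:`FlyTrackingData` uses."""
--     training_ball_idx: int | None = None
--     test_ball_idx: int | None = None
--     ball_identities: dict[int, str] = {}
--     identity_to_idx: dict[str, int] = {}
--
--     num_balls = len(track_names)
--
--     for ball_idx, track_name in enumerate(track_names):
--         track_name_lower = track_name.lower()
--
--         if track_name_lower in ["training", "train", "training_ball"]: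
--             identity = "training"
--             training_ball_idx = ball_idx
--             identity_to_idx["training"] = ball_idx
--         elif track_name_lower in ["test", "testing", "test_ball"]:
--             identity = "test"
--             test_ball_idx = ball_idx
--             identity_to_idx["test"] = ball_idx
--         else:
--             identity = track_name_lower
--
--             # F1-style experiments with two generic track names: map
--             # first → training, second → test.
--             if num_balls == 2:
--                 if ball_idx == 0 and training_ball_idx is None:
--                     training_ball_idx = ball_idx
--                     identity_to_idx["training"] = ball_idx
--                 elif ball_idx == 1 and test_ball_idx is None:
--                     test_ball_idx = ball_idx
--                     identity_to_idx["test"] = ball_idx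
--             else:
--                 if training_ball_idx is None and ball_idx == 0:
--                     training_ball_idx = ball_idx
--                     identity_to_idx["training"] = ball_idx
--
--         ball_identities[ball_idx] = identity
--
--     has_explicit_test_naming = any(
--         name.lower() in ["test", "testing", "test_ball"] for name in track_names
--     )
--     has_explicit_training_naming = any(
--         name.lower() in ["training", "train", "training_ball"] for name in track_names
--     )
--
--     # Fallback for regular experiments: if nothing was explicitly named,
--     # promote the first ball to "training" so downstream code can always
--     # find a reference ball.
--     if (
--         training_ball_idx is None
--         and num_balls > 0
--         and not has_explicit_test_naming
--         and not has_explicit_training_naming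
--     ):
--         training_ball_idx = 0
--         if "training" not in identity_to_idx:
--             identity_to_idx["training"] = 0
--
--     return training_ball_idx, test_ball_idx, ball_identities, identity_to_idx
-- ===== SOURCE B (Python) =====
-- def simulate_ball_assignment(track_names: list[str]):
--     """Assign training/test ball roles from track names."""
--     TRAIN = ("training", "train", "training_ball")
--     TEST = ("test", "testing", "test_ball")
--     n = len(track_names)
--     lows = [name.lower() for name in track_names]
--
--     ball_identities = {
--         i: ("training" if s in TRAIN else "test" if s in TEST else s)
--         for i, s in enumerate(lows)
--     }
--
--     last_train = max((i for i, s in enumerate(lows) if s in TRAIN), default=None)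
--     last_test = max((i for i, s in enumerate(lows) if s in TEST), default=None)
--
--     training_ball_idx = last_train
--     if training_ball_idx is None and n > 0 and lows[0] not in TEST:
--         training_ball_idx = 0
--
--     test_ball_idx = last_test
--     if test_ball_idx is None and n == 2 and lows[1] not in TRAIN:
--         test_ball_idx = 1
--
--     identity_to_idx = {
--         key: idx
--         for key, idx in (("training", training_ball_idx), ("test", test_ball_idx))
--         if idx is not None
--     }
--
--     return training_ball_idx, test_ball_idx, ball_identities, identity_to_idx
-- ===== Notes on version B (the rewrite author's own statement) =====
-- stated objective: simpler
-- what changed: Replaces A's single stateful loop (four mutable variables updated through nested num_balls==2 branches plus a post-loop fallback) by aggregate passes: a dict comprehension for identities, last explicit training/test index via max(), two closed-form defaulting rules, and identity_to_idx assembled in a fixed training-then-test order; Pre_ excludes lists whose first track is an explicit test name while some track is an explicit training name, where A's identity_to_idx key order (test before training) is an accident of dict insertion order and B lists training first.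
import Mathlib
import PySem

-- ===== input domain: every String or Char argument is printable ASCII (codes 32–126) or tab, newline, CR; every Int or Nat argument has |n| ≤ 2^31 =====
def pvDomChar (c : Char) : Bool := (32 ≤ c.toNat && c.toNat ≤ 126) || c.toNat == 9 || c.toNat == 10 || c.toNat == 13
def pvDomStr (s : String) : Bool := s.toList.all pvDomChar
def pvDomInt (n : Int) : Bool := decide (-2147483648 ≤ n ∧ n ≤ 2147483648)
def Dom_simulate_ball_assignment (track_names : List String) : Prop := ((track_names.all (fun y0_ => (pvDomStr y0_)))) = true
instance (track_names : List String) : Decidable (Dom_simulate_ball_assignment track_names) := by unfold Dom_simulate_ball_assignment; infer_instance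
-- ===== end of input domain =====

-- B replaces A's stateful loop by aggregate passes (identity map, last explicit index via max,
-- closed-form defaulting, fixed-order dict assembly); objective: simpler. Pre_ excludes only the
-- inputs on which the identity_to_idx dicts are equal as dicts but listed in a different key order.

-- ===== PORT A =====
-- loop body of A's `for ball_idx, track_name in enumerate(track_names)` (state: training idx, test idx, ball_identities, identity_to_idx)
def pvStepA (num_balls : Int)
    (st : Option Int × Option Int × PySem.Dict Int String × PySem.Dict String Int)
    (q : Int × String) :
    Option Int × Option Int × PySem.Dict Int String × PySem.Dict String Int :=
  let training := st.1
  let test := st.2.1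
  let bi := st.2.2.1
  let iti := st.2.2.2
  let lo := PySem.Str.lower q.2
  if ["training", "train", "training_ball"].contains lo then
    (some q.1, test, bi.insert q.1 "training", iti.insert "training" q.1)
  else if ["test", "testing", "test_ball"].contains lo then
    (training, some q.1, bi.insert q.1 "test", iti.insert "test" q.1)
  else
    if num_balls = 2 then
      if q.1 = 0 ∧ training = none then
        (some q.1, test, bi.insert q.1 lo, iti.insert "training" q.1)
      else if q.1 = 1 ∧ test = none then
        (training, some q.1, bi.insert q.1 lo, iti.insert "test" q.1)
      else
        (training, test, bi.insert q.1 lo, iti)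
    else
      if training = none ∧ q.1 = 0 then
        (some q.1, test, bi.insert q.1 lo, iti.insert "training" q.1)
      else
        (training, test, bi.insert q.1 lo, iti)

def simulate_ball_assignment (track_names : List String) :
    Option Int × Option Int × (List (Int × String)) × (List (String × Int)) :=
  let num_balls : Int := track_names.length
  let st := (PySem.List.enumerate track_names 0).foldl (pvStepA num_balls)
      (none, none, PySem.Dict.empty, PySem.Dict.empty)
  let training := st.1
  let test := st.2.1
  let bi := st.2.2.1
  let iti := st.2.2.2
  let has_explicit_test :=
    track_names.any (fun name => ["test", "testing", "test_ball"].contains (PySem.Str.lower name))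
  let has_explicit_training :=
    track_names.any (fun name => ["training", "train", "training_ball"].contains (PySem.Str.lower name))
  if training = none ∧ 0 < num_balls ∧ has_explicit_test = false ∧ has_explicit_training = false then
    (some 0, test, bi.items, (if iti.contains "training" then iti else iti.insert "training" 0).items)
  else
    (training, test, bi.items, iti.items)

-- ===== PORT B =====
def pvTRAIN : List String := ["training", "train", "training_ball"]
def pvTEST : List String := ["test", "testing", "test_ball"]

def simulate_ball_assignment_alt (track_names : List String) :
    Option Int × Option Int × (List (Int × String)) × (List (String × Int)) :=
  let n : Int := track_names.length
  let lows := track_names.map PySem.Str.lower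
  -- dict comprehension {i: ident(s) for i, s in enumerate(lows)}
  let ball_identities :=
    ((PySem.List.enumerate lows 0).map
        (fun q => (q.1, if pvTRAIN.contains q.2 then "training"
                        else if pvTEST.contains q.2 then "test" else q.2))).foldl
      (fun d p => d.insert p.1 p.2) (PySem.Dict.empty : PySem.Dict Int String)
  let last_train :=
    PySem.List.max? (((PySem.List.enumerate lows 0).filter (fun q => pvTRAIN.contains q.2)).map (·.1)) id
  let last_test :=
    PySem.List.max? (((PySem.List.enumerate lows 0).filter (fun q => pvTEST.contains q.2)).map (·.1)) id
  -- `lows[0]` / `lows[1]` are evaluated only under the guards `n > 0` / `n == 2`, so the total pyGetD is exact there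
  let training_ball_idx :=
    if last_train = none ∧ 0 < n ∧ ¬ pvTEST.contains (PySem.List.pyGetD lows 0 "") = true then some 0
    else last_train
  let test_ball_idx :=
    if last_test = none ∧ n = 2 ∧ ¬ pvTRAIN.contains (PySem.List.pyGetD lows 1 "") = true then some 1
    else last_test
  -- dict comprehension {k: i for k, i in (...) if i is not None}
  let identity_to_idx :=
    ([("training", training_ball_idx), ("test", test_ball_idx)] : List (String × Option Int)).foldl
      (fun d q => match q.2 with
        | some v => d.insert q.1 v
        | none => d) (PySem.Dict.empty : PySem.Dict String Int)
  (training_ball_idx, test_ball_idx, ball_identities.items, identity_to_idx.items)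

-- ===== PRECONDITION & SPEC =====
-- Pre_ excludes lists whose first track is an explicit test name while some track is an explicit
-- training name: there A's identity_to_idx carries the same key/value pairs but in the accidental
-- dict-insertion order "test" before "training" (in Python the two dicts compare equal), while B
-- always lists "training" first.
def Pre_simulate_ball_assignment (track_names : List String) : Prop :=
  ∀ x0, track_names.head? = some x0 →
    (["test", "testing", "test_ball"].contains (PySem.Str.lower x0) = true →
      (track_names.any fun s => ["training", "train", "training_ball"].contains (PySem.Str.lower s)) = false)
instance (track_names : List String) : Decidable (Pre_simulate_ball_assignment track_names) := by unfold Pre_simulate_ball_assignment; infer_instance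

def pvWitness_simulate_ball_assignment : List String := ["ball_1", "training"]

def Spec_simulate_ball_assignment (track_names : List String) (out : Option Int × Option Int × (List (Int × String)) × (List (String × Int))) : Prop := out = simulate_ball_assignment_alt track_names
instance (track_names : List String) (out : Option Int × Option Int × (List (Int × String)) × (List (String × Int))) : Decidable (Spec_simulate_ball_assignment track_names out) := by unfold Spec_simulate_ball_assignment; infer_instance

-- ===== CLAIM (what is proved, stated in full; the proofs are below) =====
def Claim_equal_simulate_ball_assignment : Prop := ∀ (track_names : List String), Dom_simulate_ball_assignment track_names → Pre_simulate_ball_assignment track_names → Spec_simulate_ball_assignment track_names (simulate_ball_assignment track_names)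

-- ===== LEMMAS AND PROOFS =====

def pvLo (s : String) : String := PySem.Str.lower s
def pvIsTr (s : String) : Bool := pvTRAIN.contains s
def pvIsTe (s : String) : Bool := pvTEST.contains s

-- last index whose lowered name satisfies f (A's "last explicit match wins")
def pvLastHit (f : String → Bool) (p : List String) : Option Int :=
  (PySem.List.enumerate p 0).foldl (fun acc q => if f (pvLo q.2) then some q.1 else acc) none

def pvTr (p : List String) : Option Int :=
  (pvLastHit pvIsTr p).orElse (fun _ =>
    match p with
    | [] => none
    | x :: _ => if pvIsTe (pvLo x) then none else some 0)

def pvTe (n : Int) (p : List String) : Option Int :=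
  (pvLastHit pvIsTe p).orElse (fun _ =>
    match p with
    | [_, x1] => if n = 2 ∧ pvIsTr (pvLo x1) = false ∧ pvIsTe (pvLo x1) = false then some 1 else none
    | _ => none)

def pvBIitems (p : List String) : List (Int × String) :=
  (PySem.List.enumerate p 0).map
    (fun q => (q.1, if pvIsTr (pvLo q.2) then "training"
                    else if pvIsTe (pvLo q.2) then "test" else pvLo q.2))

def pvOptPair (k : String) (o : Option Int) : List (String × Int) :=
  match o with
  | some v => [(k, v)]
  | none => []

def pvITIitems (n : Int) (p : List String) : List (String × Int) :=
  match p with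
  | [] => []
  | x :: _ =>
    if pvIsTe (pvLo x) then pvOptPair "test" (pvTe n p) ++ pvOptPair "training" (pvTr p)
    else pvOptPair "training" (pvTr p) ++ pvOptPair "test" (pvTe n p)

def pvState (n : Int) (p : List String) :
    Option Int × Option Int × PySem.Dict Int String × PySem.Dict String Int :=
  (pvTr p, pvTe n p, PySem.Dict.mk (pvBIitems p), PySem.Dict.mk (pvITIitems n p))


lemma pvEnumerate_append (p : List String) (x : String) (s : Int) :
    PySem.List.enumerate (p ++ [x]) s = PySem.List.enumerate p s ++ [(s + p.length, x)] := by
  induction p generalizing s with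
  | nil => simp [PySem.List.enumerate_cons]
  | cons y ys ih =>
    simp only [List.cons_append, PySem.List.enumerate_cons, ih, List.length_cons]
    have : s + 1 + (ys.length : Int) = s + ((ys.length : Int) + 1) := by ring
    push_cast
    rw [this]

lemma pvLastHit_append (f : String → Bool) (p : List String) (x : String) :
    pvLastHit f (p ++ [x]) = if f (pvLo x) then some (p.length : Int) else pvLastHit f p := by
  unfold pvLastHit
  rw [pvEnumerate_append, List.foldl_append]
  simp

lemma pvLastHit_eq_none_iff (f : String → Bool) (p : List String) :
    pvLastHit f p = none ↔ (p.any fun s => f (pvLo s)) = false := by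
  induction p using List.reverseRecOn with
  | nil => simp [pvLastHit]
  | append_singleton ys y ih =>
    rw [pvLastHit_append]
    by_cases h : f (pvLo y) <;> simp [h, ih]

lemma pvMax?_append_big (l : List Int) (i : Int) (h : ∀ j ∈ l, j < i) :
    PySem.List.max? (l ++ [i]) id = some i := by
  rcases hm : PySem.List.max? l id with _ | m
  · unfold PySem.List.max? at hm ⊢
    rw [List.foldl_append, hm]
    rfl
  · have hlt := h m (PySem.List.max?_mem hm)
    unfold PySem.List.max? at hm ⊢
    rw [List.foldl_append, hm]
    simp [hlt]

lemma pvMax?_filter_eq_lastHit (f : String → Bool) (p : List String) :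
    PySem.List.max?
      (((PySem.List.enumerate (p.map PySem.Str.lower) 0).filter (fun q => f q.2)).map (·.1)) id
      = pvLastHit f p := by
  induction p using List.reverseRecOn with
  | nil => simp [pvLastHit, PySem.List.max?]
  | append_singleton ys y ih =>
    rw [pvLastHit_append]
    have hmem : ∀ j ∈ ((PySem.List.enumerate (ys.map PySem.Str.lower) 0).filter
        (fun q => f q.2)).map (·.1), j < (ys.length : Int) := by
      intro j hj
      have h1 : j ∈ (PySem.List.enumerate (ys.map PySem.Str.lower) 0).map (·.1) := by
        rcases List.mem_map.1 hj with ⟨q, hq, rfl⟩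
        exact List.mem_map.2 ⟨q, List.mem_of_mem_filter hq, rfl⟩
      rw [PySem.List.map_fst_enumerate] at h1
      have := (PySem.List.mem_pyRange_one).1 h1
      simpa using this.2
    simp only [List.map_append, List.map_cons, List.map_nil]
    rw [pvEnumerate_append, List.filter_append, List.map_append]
    by_cases h : f (pvLo y)
    · have : (fun q => f q.2) ((0 : Int) + (ys.map PySem.Str.lower).length, PySem.Str.lower y) = true := by
        simpa [pvLo] using h
      simp only [List.filter_cons, List.filter_nil, this, if_pos]
      rw [show List.map (·.1) [((0:Int) + (ys.map PySem.Str.lower).length, PySem.Str.lower y)] =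
        [((ys.length : Int))] by simp]
      rw [pvMax?_append_big _ _ hmem]
      simp [h]
    · have : (fun q => f q.2) ((0 : Int) + (ys.map PySem.Str.lower).length, PySem.Str.lower y) = false := by
        simpa [pvLo] using h
      simp [this, ih, h]

-- the two keyword lists are disjoint
lemma pvTrTe (s : String) (h : pvIsTr s = true) : pvIsTe s = false := by
  simp only [pvIsTr, pvTRAIN, List.contains_eq_mem, decide_eq_true_eq] at h
  simp only [pvIsTe, pvTEST, List.contains_eq_mem]
  simp only [List.mem_cons, List.not_mem_nil, or_false] at h
  rcases h with h | h | h
  all_goals rw [h]; decide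

lemma pvTeTr (s : String) (h : pvIsTe s = true) : pvIsTr s = false := by
  by_cases h2 : pvIsTr s = true
  · rw [pvTrTe s h2] at h; cases h
  · simpa using h2

lemma pvTr_append (p : List String) (x : String) :
    pvTr (p ++ [x]) =
      if pvIsTr (pvLo x) then some (p.length : Int)
      else match p with
        | [] => if pvIsTe (pvLo x) then none else some 0
        | _ :: _ => pvTr p := by
  unfold pvTr
  rw [pvLastHit_append]
  by_cases hx : pvIsTr (pvLo x)
  · simp [hx]
  · rcases p with _ | ⟨y, ys⟩ <;> simp [pvLastHit, hx]

lemma pvTe_append_isTe (n : Int) (p : List String) (x : String) (hx : pvIsTe (pvLo x) = true) :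
    pvTe n (p ++ [x]) = some (p.length : Int) := by
  unfold pvTe
  rw [pvLastHit_append]
  simp [hx]

lemma pvTe_nil (n : Int) (x : String) (hx : pvIsTe (pvLo x) = false) :
    pvTe n [x] = none := by
  unfold pvTe pvLastHit
  simp [PySem.List.enumerate_cons, hx]

lemma pvTe_append_one (n : Int) (x0 x : String) (hx : pvIsTe (pvLo x) = false) :
    pvTe n ([x0] ++ [x]) =
      (pvLastHit pvIsTe [x0]).orElse
        (fun _ => if n = 2 ∧ pvIsTr (pvLo x) = false then some 1 else none) := by
  unfold pvTe
  rw [pvLastHit_append]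
  simp only [hx, Bool.false_eq_true, if_false, List.length_cons, List.length_nil]
  rcases hl : pvLastHit pvIsTe [x0] with _ | b
  · simp [hx]
  · simp

lemma pvTe_append_big (n : Int) (x0 x1 : String) (rest : List String) (x : String)
    (hx : pvIsTe (pvLo x) = false) (h : ((x0 :: x1 :: rest).length : Int) < n) :
    pvTe n ((x0 :: x1 :: rest) ++ [x]) = pvTe n (x0 :: x1 :: rest) := by
  unfold pvTe
  rw [pvLastHit_append]
  simp only [hx, Bool.false_eq_true, if_false]
  congr 1
  funext u
  rcases rest with _ | ⟨z, zs⟩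
  · have : ¬ (n = 2) := by
      simp at h
      omega
    simp [this]
  · rfl

lemma pvLastHit_cons_some (f : String → Bool) (y : String) (ys : List String)
    (hy : f (pvLo y) = true) : ∃ b, pvLastHit f (y :: ys) = some b := by
  rcases hl : pvLastHit f (y :: ys) with _ | b
  · rw [pvLastHit_eq_none_iff] at hl
    simp [hy] at hl
  · exact ⟨b, rfl⟩

lemma pvTr_cons_some (y : String) (ys : List String) (hy : pvIsTe (pvLo y) = false) :
    ∃ a, pvTr (y :: ys) = some a := by
  unfold pvTr
  rcases hl : pvLastHit pvIsTr (y :: ys) with _ | a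
  · exact ⟨0, by simp [hy]⟩
  · exact ⟨a, rfl⟩

lemma pvTe_cons_some (n : Int) (y : String) (ys : List String) (hy : pvIsTe (pvLo y) = true) :
    ∃ b, pvTe n (y :: ys) = some b := by
  unfold pvTe
  rcases pvLastHit_cons_some pvIsTe y ys hy with ⟨b, hb⟩
  exact ⟨b, by rw [hb]; rfl⟩

lemma pvBIitems_append (p : List String) (x : String) :
    pvBIitems (p ++ [x]) = pvBIitems p ++
      [((p.length : Int), if pvIsTr (pvLo x) then "training"
          else if pvIsTe (pvLo x) then "test" else pvLo x)] := by
  unfold pvBIitems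
  rw [pvEnumerate_append]
  simp

lemma pvBI_contains (p : List String) :
    (PySem.Dict.mk (pvBIitems p)).contains ((p.length : Int)) = false := by
  rw [PySem.Dict.contains_eq_decide_mem_keys]
  simp only [decide_eq_false_iff_not]
  intro hmem
  have h1 : ((p.length : Int)) ∈ (PySem.List.enumerate p 0).map (·.1) := by
    have : (PySem.Dict.mk (pvBIitems p)).keys = (pvBIitems p).map (·.1) := by
      simp [PySem.Dict.keys_mk]
    rw [this] at hmem
    unfold pvBIitems at hmem
    rcases List.mem_map.1 hmem with ⟨q, hq, hq2⟩
    rcases List.mem_map.1 hq with ⟨r, hr, rfl⟩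
    exact List.mem_map.2 ⟨r, hr, hq2⟩
  rw [PySem.List.map_fst_enumerate] at h1
  have := (PySem.List.mem_pyRange_one).1 h1
  omega

lemma pvBI_insert (p : List String) (v : String) :
    (PySem.Dict.mk (pvBIitems p)).insert ((p.length : Int)) v
      = PySem.Dict.mk (pvBIitems p ++ [((p.length : Int), v)]) := by
  apply PySem.Dict.ext
  rw [PySem.Dict.items_insert_of_not_contains _ _ (pvBI_contains p)]

lemma pvTe_append_keep (n : Int) (p : List String) (x : String)
    (hx : pvIsTe (pvLo x) = false) (h : (p.length : Int) < n)
    (hcase : pvIsTr (pvLo x) = true ∨ n ≠ 2 ∨ pvTe n p ≠ none) :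
    pvTe n (p ++ [x]) = pvTe n p := by
  rcases p with _ | ⟨x0, _ | ⟨x1, rest⟩⟩
  · simp only [List.nil_append]
    rw [pvTe_nil n x hx]
    rfl
  · rw [pvTe_append_one n x0 x hx]
    rcases hl : pvLastHit pvIsTe [x0] with _ | b
    · have hg : pvTe n [x0] = none := by
        unfold pvTe
        rw [hl]
        rfl
      rw [hg]
      rcases hcase with hc | hc | hc
      · simp [hc]
      · simp [hc]
      · exact absurd hg hc
    · unfold pvTe
      rw [hl]
      rfl
  · exact pvTe_append_big n x0 x1 rest x hx h

lemma pvTr_one_some (x0 : String) (hy : pvIsTe (pvLo x0) = false) :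
    pvTr [x0] = some 0 := by
  unfold pvTr pvLastHit
  by_cases ht : pvIsTr (pvLo x0) <;> simp [PySem.List.enumerate_cons, ht, hy]

lemma pvStep_spec (n : Int) (p : List String) (x : String) (h : (p.length : Int) < n) :
    pvStepA n (pvState n p) ((p.length : Int), x) = pvState n (p ++ [x]) := by
  by_cases htr : pvIsTr (pvLo x) = true
  · -- explicit training name
    have hte : pvIsTe (pvLo x) = false := pvTrTe _ htr
    have hc1 : (["training", "train", "training_ball"].contains (PySem.Str.lower x)) = true := htr
    have hbi := pvBI_insert p "training"
    have hbia := pvBIitems_append p x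
    rw [htr] at hbia
    simp only [if_true] at hbia
    have htr' : pvTr (p ++ [x]) = some (p.length : Int) := by rw [pvTr_append, htr]; rfl
    have hte' : pvTe n (p ++ [x]) = pvTe n p :=
      pvTe_append_keep n p x hte h (Or.inl htr)
    simp only [pvStepA, pvState, hc1, if_true, Prod.mk.injEq]
    refine ⟨htr'.symm, hte'.symm, by rw [hbi, hbia], ?_⟩
    -- identity_to_idx
    rcases p with _ | ⟨y, ys⟩
    · rw [show pvITIitems n ([] ++ [x]) = [("training", 0)] by
        simp only [List.nil_append, pvITIitems, hte, Bool.false_eq_true, if_false]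
        rw [show pvTr [x] = some 0 from pvTr_one_some x hte, pvTe_nil n x hte]
        rfl]
      rfl
    · by_cases hy : pvIsTe (pvLo y) = true
      · rcases pvTe_cons_some n y ys hy with ⟨b, hb⟩
        have hitems : pvITIitems n (y :: ys ++ [x]) =
            [("test", b)] ++ [("training", ((y :: ys).length : Int))] := by
          simp only [pvITIitems, List.cons_append, hy, if_true]
          rw [show pvTe n (y :: (ys ++ [x])) = some b by rw [← hb]; exact hte']
          rw [show pvTr (y :: (ys ++ [x])) = some (((y :: ys).length : Int)) from htr']
          rfl
        rw [hitems]
        simp only [pvITIitems, hy, if_true, hb]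
        rcases ha : pvTr (y :: ys) with _ | a <;> rfl
      · have hy' : pvIsTe (pvLo y) = false := by simpa using hy
        rcases pvTr_cons_some y ys hy' with ⟨a, ha⟩
        have hitems : pvITIitems n (y :: ys ++ [x]) =
            [("training", ((y :: ys).length : Int))] ++ pvOptPair "test" (pvTe n (y :: ys)) := by
          simp only [pvITIitems, List.cons_append, hy', Bool.false_eq_true, if_false]
          rw [show pvTe n (y :: (ys ++ [x])) = pvTe n (y :: ys) from hte']
          rw [show pvTr (y :: (ys ++ [x])) = some (((y :: ys).length : Int)) from htr']
          rfl
        rw [hitems]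
        simp only [pvITIitems, hy', Bool.false_eq_true, if_false, ha]
        rcases hb : pvTe n (y :: ys) with _ | b <;> rfl
  · have htr2 : pvIsTr (pvLo x) = false := by simpa using htr
    have hc1 : (["training", "train", "training_ball"].contains (PySem.Str.lower x)) = false := htr2
    by_cases hte : pvIsTe (pvLo x) = true
    · -- explicit test name
      have hc2 : (["test", "testing", "test_ball"].contains (PySem.Str.lower x)) = true := hte
      have hbi := pvBI_insert p "test"
      have hbia := pvBIitems_append p x
      rw [htr2, hte] at hbia
      simp only [Bool.false_eq_true, if_false, if_true] at hbia
      have hte' : pvTe n (p ++ [x]) = some (p.length : Int) := pvTe_append_isTe n p x hte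
      simp only [pvStepA, pvState, hc1, hc2, Bool.false_eq_true, if_false, if_true,
        Prod.mk.injEq]
      refine ⟨?_, hte'.symm, by rw [hbi, hbia], ?_⟩
      · rcases p with _ | ⟨y, ys⟩
        · rw [pvTr_append, htr2]
          simp only [Bool.false_eq_true, if_false]
          simp [hte, pvTr, pvLastHit]
        · rw [pvTr_append, htr2]
          rfl
      -- identity_to_idx
      rcases p with _ | ⟨y, ys⟩
      · rw [show pvITIitems n ([] ++ [x]) = [("test", 0)] by
          simp only [List.nil_append, pvITIitems, hte, if_true]
          rw [show pvTe n [x] = some 0 by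
            rw [show ([x] : List String) = [] ++ [x] by rfl, pvTe_append_isTe n [] x hte]; rfl]
          rw [show pvTr [x] = none by
            unfold pvTr pvLastHit
            simp [PySem.List.enumerate_cons, htr2, hte]]
          rfl]
        rfl
      · have hkeep : pvTr ((y :: ys) ++ [x]) = pvTr (y :: ys) := by
          rw [pvTr_append, htr2]
          rfl
        by_cases hy : pvIsTe (pvLo y) = true
        · rcases pvTe_cons_some n y ys hy with ⟨b, hb⟩
          have hitems : pvITIitems n (y :: ys ++ [x]) =
              [("test", ((y :: ys).length : Int))] ++ pvOptPair "training" (pvTr (y :: ys)) := by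
            simp only [pvITIitems, List.cons_append, hy, if_true]
            rw [show pvTe n (y :: (ys ++ [x])) = some (((y :: ys).length : Int)) from hte', show pvTr (y :: (ys ++ [x])) = pvTr (y :: ys) from hkeep]
            rfl
          rw [hitems]
          simp only [pvITIitems, hy, if_true, hb]
          rcases ha : pvTr (y :: ys) with _ | a <;> rfl
        · have hy' : pvIsTe (pvLo y) = false := by simpa using hy
          rcases pvTr_cons_some y ys hy' with ⟨a, ha⟩
          have hitems : pvITIitems n (y :: ys ++ [x]) =
              pvOptPair "training" (pvTr (y :: ys)) ++ [("test", ((y :: ys).length : Int))] := by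
            simp only [pvITIitems, List.cons_append, hy', Bool.false_eq_true, if_false]
            rw [show pvTe n (y :: (ys ++ [x])) = some (((y :: ys).length : Int)) from hte', show pvTr (y :: (ys ++ [x])) = pvTr (y :: ys) from hkeep]
            rfl
          rw [hitems]
          simp only [pvITIitems, hy', Bool.false_eq_true, if_false, ha]
          rcases hb : pvTe n (y :: ys) with _ | b <;> rfl
    · -- generic name
      have hte2 : pvIsTe (pvLo x) = false := by simpa using hte
      have hc2 : (["test", "testing", "test_ball"].contains (PySem.Str.lower x)) = false := hte2
      have hbi := pvBI_insert p (PySem.Str.lower x)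
      have hbia := pvBIitems_append p x
      rw [htr2, hte2] at hbia
      simp only [Bool.false_eq_true, if_false] at hbia
      rcases p with _ | ⟨y, ys⟩
      · -- p = [], index 0: both arms of the n == 2 split set training
        have htr' : pvTr ([] ++ [x]) = some 0 := by
          simpa using pvTr_one_some x hte2
        have hte' : pvTe n ([] ++ [x]) = none := by
          simpa using pvTe_nil n x hte2
        have hiti : pvITIitems n ([] ++ [x]) = [("training", 0)] := by
          simp only [List.nil_append, pvITIitems, hte2, Bool.false_eq_true, if_false]
          rw [pvTr_one_some x hte2, pvTe_nil n x hte2]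
          rfl
        have hrhs : pvState n ([] ++ [x]) =
            (some 0, none, PySem.Dict.mk [((0 : Int), pvLo x)], PySem.Dict.mk [("training", 0)]) := by
          simp only [pvState, htr', hte', hiti]
          rw [show pvBIitems ([] ++ [x]) = [((0 : Int), pvLo x)] by simpa using hbia]
        rw [hrhs]
        by_cases hn : n = 2
        · subst hn
          simp only [pvStepA, hc1, hc2, Bool.false_eq_true, if_false]
          rfl
        · simp only [pvStepA, hc1, hc2, Bool.false_eq_true, if_false, hn]
          rfl
      · by_cases hn : n = 2
        · -- n = 2: the prefix must be exactly one element long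
          subst hn
          rcases ys with _ | ⟨z, zs⟩
          · -- p = [y], index 1
            have hLne : ¬ ((([y] : List String).length : Int) = 0 ∧ pvTr [y] = none) := by
              simp
            by_cases hteo : pvTe 2 [y] = none
            · have hy : pvIsTe (pvLo y) = false := by
                by_contra hyy
                simp only [Bool.not_eq_false] at hyy
                rcases pvTe_cons_some 2 y [] hyy with ⟨b, hb⟩
                rw [hb] at hteo
                cases hteo
              have htr0 : pvTr [y] = some 0 := pvTr_one_some y hy
              have htr' : pvTr [y, x] = some 0 := by
                show pvTr ([y] ++ [x]) = some 0
                rw [pvTr_append, htr2]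
                simp only [Bool.false_eq_true, if_false]
                exact htr0
              have hte' : pvTe 2 [y, x] = some 1 := by
                show pvTe 2 ([y] ++ [x]) = some 1
                rw [pvTe_append_one 2 y x hte2]
                rw [show pvLastHit pvIsTe [y] = none by
                  rw [pvLastHit_eq_none_iff]; simp [hy]]
                simp [htr2]
              have hiti : pvITIitems 2 [y, x] = [("training", 0), ("test", 1)] := by
                simp only [pvITIitems, hy, Bool.false_eq_true, if_false]
                rw [htr', hte']
                rfl
              have hitiold : pvITIitems 2 [y] = [("training", 0)] := by
                simp only [pvITIitems, hy, Bool.false_eq_true, if_false]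
                rw [htr0, hteo]
                rfl
              simp only [pvStepA, pvState, hc1, hc2, Bool.false_eq_true, if_false, if_true,
                hteo, htr0, List.length_cons, List.length_nil]
              norm_num
              refine ⟨htr'.symm, hte'.symm, ?_, ?_⟩
              · rw [show pvBIitems [y, x] = pvBIitems [y] ++ [(((1 : Nat) : Int), pvLo x)] by simpa using hbia]
                exact hbi
              · rw [hitiold, hiti]
                rfl
            · -- test was already explicitly named at index 0: nothing changes
              have hy : pvIsTe (pvLo y) = true := by
                by_contra hyy
                simp only [Bool.not_eq_true] at hyy
                apply hteo
                unfold pvTe pvLastHit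
                simp [PySem.List.enumerate_cons, hyy]
              have hteval : pvTe 2 [y] = some 0 := by
                unfold pvTe pvLastHit
                simp [PySem.List.enumerate_cons, hy]
              have htrval : pvTr [y] = none := by
                unfold pvTr pvLastHit
                simp [PySem.List.enumerate_cons, pvTeTr _ hy, hy]
              have htr' : pvTr [y, x] = none := by
                show pvTr ([y] ++ [x]) = none
                rw [pvTr_append, htr2]
                simp only [Bool.false_eq_true, if_false]
                exact htrval
              have hte' : pvTe 2 [y, x] = some 0 := by
                show pvTe 2 ([y] ++ [x]) = some 0
                rw [pvTe_append_keep 2 [y] x hte2 (by simp) (Or.inr (Or.inr (by rw [hteval]; simp))), hteval]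
              have hiti : pvITIitems 2 [y, x] = pvITIitems 2 [y] := by
                simp only [pvITIitems, hy, if_true]
                rw [htr', hte', hteval, htrval]
              simp only [pvStepA, pvState, hc1, hc2, Bool.false_eq_true, if_false, if_true,
                hteval, htrval, List.length_cons]
              norm_num
              rw [if_neg (by simp : ¬ (some (0 : Int) = none))]
              simp only [Prod.mk.injEq]
              refine ⟨htr'.symm, hte'.symm, ?_, ?_⟩
              · rw [show pvBIitems [y, x] = pvBIitems [y] ++ [(((1 : Nat) : Int), pvLo x)] by simpa using hbia]
                exact hbi
              · rw [hiti]
          · -- prefix of length ≥ 2 with n = 2 is impossible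
            exfalso
            simp only [List.length_cons] at h
            omega
        · -- n ≠ 2: index is ≥ 1, nothing but ball_identities changes
          have hL : ¬ (pvTr (y :: ys) = none ∧ (((y :: ys).length : Int)) = 0) := by
            rintro ⟨-, hL0⟩
            simp only [List.length_cons] at hL0
            omega
          have htr' : pvTr (y :: ys ++ [x]) = pvTr (y :: ys) := by
            rw [show (y :: ys ++ [x]) = (y :: ys) ++ [x] by rfl, pvTr_append, htr2]
            rfl
          have hte' : pvTe n (y :: ys ++ [x]) = pvTe n (y :: ys) :=
            pvTe_append_keep n (y :: ys) x hte2 h (Or.inr (Or.inl hn))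
          have hiti : pvITIitems n (y :: ys ++ [x]) = pvITIitems n (y :: ys) := by
            simp only [List.cons_append, pvITIitems]
            rw [show pvTe n (y :: (ys ++ [x])) = pvTe n (y :: ys) from hte',
              show pvTr (y :: (ys ++ [x])) = pvTr (y :: ys) from htr']
          simp only [pvStepA, pvState, hc1, hc2, Bool.false_eq_true, if_false, hn,
            hL, Prod.mk.injEq]
          rw [htr', hte', hbi, hbia, hiti]
          refine ⟨rfl, rfl, rfl, rfl⟩

lemma pvLoop (n : Int) (q p : List String) (h : ((p ++ q).length : Int) ≤ n) :
    (PySem.List.enumerate q (p.length : Int)).foldl (pvStepA n) (pvState n p)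
      = pvState n (p ++ q) := by
  induction q generalizing p with
  | nil => simp
  | cons y ys ih =>
    rw [PySem.List.enumerate_cons, List.foldl_cons]
    have hlt : (p.length : Int) < n := by
      simp at h ⊢
      omega
    rw [pvStep_spec n p y hlt]
    have := ih (p ++ [y]) (by simpa using h)
    simp only [List.length_append, List.length_cons, List.length_nil] at this
    rw [show ((p.length : Int) + 1) = (((p.length + 1 : Nat)) : Int) by push_cast; ring]
    rw [this]
    simp

lemma pvEnumerate_map (xs : List String) (s : Int) :
    PySem.List.enumerate (xs.map PySem.Str.lower) s
      = (PySem.List.enumerate xs s).map (fun q => (q.1, PySem.Str.lower q.2)) := by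
  induction xs generalizing s with
  | nil => simp
  | cons y ys ih => simp [PySem.List.enumerate_cons, ih]

lemma pvNoFallback (xs : List String) :
    ¬ (pvTr xs = none ∧ 0 < (xs.length : Int)
        ∧ (xs.any fun name => pvIsTe (pvLo name)) = false
        ∧ (xs.any fun name => pvIsTr (pvLo name)) = false) := by
  rintro ⟨h1, h2, h3, h4⟩
  rcases xs with _ | ⟨y, ys⟩
  · simp at h2
  · simp only [List.any_cons, Bool.or_eq_false_iff] at h3
    rcases pvTr_cons_some y ys h3.1 with ⟨a, ha⟩
    rw [ha] at h1
    cases h1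

lemma pvFoldPairs (k1 k2 : String) (o1 o2 : Option Int) (hk : (k1 == k2) = false) :
    (([(k1, o1), (k2, o2)] : List (String × Option Int)).foldl
        (fun d q => match q.2 with
          | some v => d.insert q.1 v
          | none => d) (PySem.Dict.empty : PySem.Dict String Int)).items
      = pvOptPair k1 o1 ++ pvOptPair k2 o2 := by
  rcases o1 with _ | v1 <;> rcases o2 with _ | v2 <;>
    simp only [List.foldl_cons, List.foldl_nil, pvOptPair]
  · rfl
  · rfl
  · rfl
  · show ((PySem.Dict.mk [(k1, v1)]).insert k2 v2).items = [(k1, v1), (k2, v2)]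
    rw [PySem.Dict.items_insert_of_not_contains _ _ (by
      rw [PySem.Dict.contains_eq_isSome_get?, PySem.Dict.get?_mk_cons]
      simp only [hk, Bool.false_eq_true, if_false]
      rfl)]
    rfl

lemma pvTrB (xs : List String) :
    (if pvLastHit pvIsTr xs = none ∧ 0 < (xs.length : Int)
        ∧ ¬ pvIsTe (PySem.List.pyGetD (xs.map PySem.Str.lower) 0 "") = true
      then some 0 else pvLastHit pvIsTr xs) = pvTr xs := by
  rcases xs with _ | ⟨y, ys⟩
  · simp [pvTr, pvLastHit]
  · rcases hl : pvLastHit pvIsTr (y :: ys) with _ | a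
    · have hg : PySem.List.pyGetD ((y :: ys).map PySem.Str.lower) 0 "" = pvLo y := by
        simp [PySem.List.pyGetD_zero_cons, pvLo]
      rw [hg]
      unfold pvTr
      rw [hl]
      by_cases hy : pvIsTe (pvLo y) = true <;> simp [hy]
    · unfold pvTr
      rw [hl]
      simp

lemma pvTeB (xs : List String) :
    (if pvLastHit pvIsTe xs = none ∧ ((xs.length : Int)) = 2
        ∧ ¬ pvIsTr (PySem.List.pyGetD (xs.map PySem.Str.lower) 1 "") = true
      then some 1 else pvLastHit pvIsTe xs) = pvTe (xs.length : Int) xs := by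
  rcases hl : pvLastHit pvIsTe xs with _ | b
  · rcases xs with _ | ⟨x0, _ | ⟨x1, _ | ⟨x2, rest⟩⟩⟩
    · simp [pvTe, pvLastHit]
    · unfold pvTe
      rw [hl]
      simp
    · have hl' := hl
      rw [pvLastHit_eq_none_iff] at hl'
      simp only [List.any_cons, List.any_nil, Bool.or_eq_false_iff] at hl'
      have hg : PySem.List.pyGetD ([x0, x1].map PySem.Str.lower) 1 "" = pvLo x1 := by
        simp [PySem.List.pyGetD, pvLo]
      rw [hg]
      unfold pvTe
      rw [hl]
      by_cases hx1 : pvIsTr (pvLo x1) = true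
      · simp [hx1]
      · simp [hx1, hl'.2.1]
    · unfold pvTe
      rw [hl]
      have hlen : ¬ (((x0 :: x1 :: x2 :: rest).length : Int) = 2) := by
        simp only [List.length_cons]
        push_cast
        omega
      simp only [List.length_cons] at hlen ⊢
      simp
      intro hcontra
      exact absurd hcontra (by omega)
  · unfold pvTe
    rw [hl]
    simp

-- under Pre_, B's fixed training-then-test order agrees with A's insertion order
lemma pvItiEqPre (xs : List String) (hpre : Pre_simulate_ball_assignment xs) :
    pvOptPair "training" (pvTr xs) ++ pvOptPair "test" (pvTe (xs.length : Int) xs)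
      = pvITIitems (xs.length : Int) xs := by
  rcases xs with _ | ⟨y, ys⟩
  · simp [pvITIitems, pvTr, pvTe, pvLastHit, pvOptPair]
  · simp only [pvITIitems]
    by_cases hy : pvIsTe (pvLo y) = true
    · have hnotr : ((y :: ys).any fun s => pvIsTr (pvLo s)) = false := by
        have := hpre y (by rfl) hy
        simpa [pvIsTr, pvTRAIN, pvLo] using this
      have hltr : pvLastHit pvIsTr (y :: ys) = none := by
        rw [pvLastHit_eq_none_iff]
        exact hnotr
      have htr : pvTr (y :: ys) = none := by
        unfold pvTr
        rw [hltr]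
        simp [hy]
      rw [htr]
      simp [hy, pvOptPair]
    · simp [hy]

-- ===== VERDICT (by name: the statement is the Claim_ definition above) =====
theorem simulate_ball_assignment_spec : Claim_equal_simulate_ball_assignment := by
  intro xs _ hpre
  unfold Spec_simulate_ball_assignment
  have hfold : (PySem.List.enumerate xs 0).foldl (pvStepA (xs.length : Int))
      (none, none, PySem.Dict.empty, PySem.Dict.empty) = pvState (xs.length : Int) xs := by
    have h := pvLoop (xs.length : Int) xs [] (by simp)
    simpa using h
  have hA : simulate_ball_assignment xs =
      (pvTr xs, pvTe (xs.length : Int) xs, pvBIitems xs, pvITIitems (xs.length : Int) xs) := by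
    simp only [simulate_ball_assignment]
    rw [hfold]
    simp only [pvState]
    rw [if_neg (show ¬ (pvTr xs = none ∧ 0 < ((xs.length : Int))
        ∧ (xs.any fun name => ["test", "testing", "test_ball"].contains (PySem.Str.lower name)) = false
        ∧ (xs.any fun name => ["training", "train", "training_ball"].contains (PySem.Str.lower name)) = false)
      from pvNoFallback xs)]
  have hbid : (((PySem.List.enumerate (xs.map PySem.Str.lower) 0).map
        (fun q => (q.1, if pvTRAIN.contains q.2 then "training"
                        else if pvTEST.contains q.2 then "test" else q.2))).foldl
      (fun d p => d.insert p.1 p.2) (PySem.Dict.empty : PySem.Dict Int String)).items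
      = pvBIitems xs := by
    rw [PySem.Dict.items_foldl_insert_fresh _ Prod.fst Prod.snd _
      (by intro a _; simp [PySem.Dict.contains_empty])
      (by
        rw [List.map_map]
        rw [show List.map (Prod.fst ∘ (fun q : Int × String => (q.1,
            if pvTRAIN.contains q.2 then "training"
            else if pvTEST.contains q.2 then "test" else q.2)))
            (PySem.List.enumerate (xs.map PySem.Str.lower) 0)
          = List.map (fun q : Int × String => q.1)
            (PySem.List.enumerate (xs.map PySem.Str.lower) 0) from rfl]
        rw [PySem.List.map_fst_enumerate]
        apply PySem.List.nodup_pyRange_one)]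
    rw [show ((PySem.Dict.empty : PySem.Dict Int String)).items = [] from rfl]
    rw [List.nil_append]
    rw [show List.map (fun a : Int × String => (Prod.fst a, Prod.snd a))
        ((PySem.List.enumerate (xs.map PySem.Str.lower) 0).map
          (fun q => (q.1, if pvTRAIN.contains q.2 then "training"
                          else if pvTEST.contains q.2 then "test" else q.2)))
      = (PySem.List.enumerate (xs.map PySem.Str.lower) 0).map
          (fun q => (q.1, if pvTRAIN.contains q.2 then "training"
                          else if pvTEST.contains q.2 then "test" else q.2)) by simp]
    rw [pvEnumerate_map, List.map_map]
    rfl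
  have hB : simulate_ball_assignment_alt xs =
      (pvTr xs, pvTe (xs.length : Int) xs, pvBIitems xs, pvITIitems (xs.length : Int) xs) := by
    simp only [simulate_ball_assignment_alt]
    rw [show PySem.List.max? (((PySem.List.enumerate (xs.map PySem.Str.lower) 0).filter
        (fun q => pvTRAIN.contains q.2)).map (·.1)) id = pvLastHit pvIsTr xs
      from pvMax?_filter_eq_lastHit pvIsTr xs]
    rw [show PySem.List.max? (((PySem.List.enumerate (xs.map PySem.Str.lower) 0).filter
        (fun q => pvTEST.contains q.2)).map (·.1)) id = pvLastHit pvIsTe xs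
      from pvMax?_filter_eq_lastHit pvIsTe xs]
    rw [show (if pvLastHit pvIsTr xs = none ∧ 0 < ((xs.length : Int))
          ∧ ¬ pvTEST.contains (PySem.List.pyGetD (xs.map PySem.Str.lower) 0 "") = true
        then some 0 else pvLastHit pvIsTr xs) = pvTr xs from pvTrB xs]
    rw [show (if pvLastHit pvIsTe xs = none ∧ ((xs.length : Int)) = 2
          ∧ ¬ pvTRAIN.contains (PySem.List.pyGetD (xs.map PySem.Str.lower) 1 "") = true
        then some 1 else pvLastHit pvIsTe xs) = pvTe (xs.length : Int) xs from pvTeB xs]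
    rw [hbid]
    rw [pvFoldPairs "training" "test" (pvTr xs) (pvTe (xs.length : Int) xs) (by decide)]
    rw [pvItiEqPre xs hpre]
  rw [hA, hB]
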